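-- pv_equiv track=rewrite | github.com/con-mac/gcloud-v15-automation-app | pa-gcloud-easyAuth/backend/app/api/routes/proposals.py | extract_name_from_email
-- ===== SOURCE A (Python) =====
-- def extract_name_from_email(email: str) -> str:
--     """
--     Extract name from email for backward compatibility with SharePoint metadata.
--
--     SharePoint stores owner as name (e.g., "Firstname Lastname"), so we extract
--     the name from the Entra ID email for matching.
--
--     Handles formats:
--     - Firstname.Lastname@paconsulting.com → "Firstname Lastname"
--     - firstname.lastname@domain.com → "Firstname Lastname"
--     - user@domain.com → "User" (fallback)
--
--     Args:
--         email: Email address from Entra ID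
--
--     Returns:
--         Name in format "Firstname Lastname" for matching with SharePoint metadata
--     """
--     if not email or '@' not in email:
--         return ''
--
--     # Get local part (before @)
--     local_part = email.split('@')[0]
--
--     # If email contains dots, assume format: firstname.lastname
--     if '.' in local_part:
--         # Replace . with space and capitalize
--         name_parts = local_part.split('.')
--         name = ' '.join(word.capitalize() for word in name_parts if word)
--     else:
--         # Single word - capitalize first letter
--         name = local_part.capitalize()
--
--     # Capitalize first letter of each word
--     name = ' '.join(word.capitalize() for word in name.split())
--
--     return name
-- ===== SOURCE B (Python) =====
-- def extract_name_from_email(email: str) -> str: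
--     if not email or '@' not in email:
--         return ''
--     out = []
--     start_word = True
--     for ch in email:
--         if ch == '@':
--             break
--         if ch == '.' or ch.isspace():
--             start_word = True
--         elif start_word:
--             if out:
--                 out.append(' ')
--             out.append(ch.upper())
--             start_word = False
--         else:
--             out.append(ch.lower())
--     return ''.join(out)
-- ===== Notes on version B (the rewrite author's own statement) =====
-- stated objective: alternative
-- what changed: B replaces A's multi-pass split/capitalize/join pipeline (split on '@', branch on '.', split again, join, re-split, re-capitalize) by a single left-to-right state-machine pass over the email that emits the capitalized name character by character, tracking only a word-boundary flag.
import Mathlib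
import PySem

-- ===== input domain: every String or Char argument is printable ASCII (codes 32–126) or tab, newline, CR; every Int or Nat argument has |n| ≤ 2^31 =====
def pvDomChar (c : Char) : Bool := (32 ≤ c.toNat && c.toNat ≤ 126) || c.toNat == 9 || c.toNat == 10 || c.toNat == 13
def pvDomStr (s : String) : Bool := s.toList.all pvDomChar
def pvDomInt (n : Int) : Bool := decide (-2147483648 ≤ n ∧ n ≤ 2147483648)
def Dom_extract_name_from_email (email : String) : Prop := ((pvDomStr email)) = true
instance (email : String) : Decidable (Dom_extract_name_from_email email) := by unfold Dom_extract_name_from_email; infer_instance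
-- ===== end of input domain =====

-- B replaces A's split/capitalize/join passes by one left-to-right state-machine pass over the email (objective: alternative).

-- ===== PORT A =====
-- str.capitalize, ported by hand (not in PySem): first char uppercased, rest lowercased; exact on the ASCII domain
def pyCapitalize (w : List Char) : List Char :=
  match w with
  | [] => []
  | c :: t => PySem.Chars.upperChar c :: t.map PySem.Chars.lowerChar

def extract_name_from_email (email : String) : String :=
  if email == "" || !(PySem.Str.isIn "@" email) then "" else
  -- email.split('@')[0]: split on a nonempty separator never returns an empty list, so [0] is the head
  let local_part := (PySem.Chars.splitOn email.toList ['@']).headD []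
  let name :=
    if PySem.Chars.isIn ['.'] local_part then
      PySem.Chars.join [' ']
        (((PySem.Chars.splitOn local_part ['.']).filter (fun w => !w.isEmpty)).map pyCapitalize)
    else
      pyCapitalize local_part
  String.ofList (PySem.Chars.join [' '] ((PySem.Chars.split₀ name).map pyCapitalize))

-- ===== PORT B =====
-- B's for-loop with break, out list and start_word flag, transliterated as structural recursion
def altGo : List Char → List Char → Bool → List Char
  | [], out, _ => out
  | c :: t, out, sw =>
      if c == '@' then out
      else if c == '.' || PySem.Chars.isspace c then altGo t out true
      else if sw then
        altGo t ((out ++ (if out.isEmpty then [] else [' '])) ++ [PySem.Chars.upperChar c]) false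
      else altGo t (out ++ [PySem.Chars.lowerChar c]) false

def extract_name_from_email_alt (email : String) : String :=
  if email == "" || !(PySem.Str.isIn "@" email) then "" else
  String.ofList (altGo email.toList [] true)

-- ===== PRECONDITION & SPEC =====
def Spec_extract_name_from_email (email : String) (out : String) : Prop := out = extract_name_from_email_alt email
instance (email : String) (out : String) : Decidable (Spec_extract_name_from_email email out) := by unfold Spec_extract_name_from_email; infer_instance

-- ===== CLAIM (what is proved, stated in full; the proofs are below) =====
def Claim_equal_extract_name_from_email : Prop := ∀ (email : String), Dom_extract_name_from_email email → Spec_extract_name_from_email email (extract_name_from_email email)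

-- ===== LEMMAS AND PROOFS =====

-- accumulator-free form of PySem.Chars.split₀.go (cur is the reversed current word)
def pvBody : List Char → List Char → List (List Char)
  | [], cur => if cur.isEmpty then [] else [cur.reverse]
  | c :: s, cur =>
      if PySem.Chars.isspace c then
        (if cur.isEmpty then pvBody s [] else cur.reverse :: pvBody s [])
      else pvBody s (c :: cur)

-- structural form of PySem.Chars.splitOn · [sep] : (first piece, remaining pieces)
def pvSplitD (sep : Char) : List Char → List Char × List (List Char)
  | [] => ([], [])
  | c :: t =>
      let r := pvSplitD sep t
      if c == sep then ([], r.1 :: r.2) else (c :: r.1, r.2)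

def pvDot (c : Char) : Char := if c == '.' then ' ' else c

theorem pv_go_body (s : List Char) : ∀ cur acc,
    PySem.Chars.split₀.go s cur acc = acc.reverse ++ pvBody s cur := by
  induction s with
  | nil => intro cur acc; by_cases h : cur.isEmpty <;>
      simp [PySem.Chars.split₀.go, pvBody, h]
  | cons c s ih =>
      intro cur acc
      by_cases hs : PySem.Chars.isspace c
      · by_cases h : cur.isEmpty <;>
          simp [PySem.Chars.split₀.go, pvBody, hs, h, ih]
      · simp [PySem.Chars.split₀.go, pvBody, hs, ih]

theorem pv_split₀_eq (s : List Char) : PySem.Chars.split₀ s = pvBody s [] := by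
  simpa using pv_go_body s [] []

theorem pv_splitOn_go (sep : Char) (s : List Char) : ∀ (fuel : Nat) (cur : List Char) acc,
    s.length < fuel →
    PySem.Chars.splitOn.go [sep] fuel s cur acc
      = acc.reverse ++ (cur.reverse ++ (pvSplitD sep s).1) :: (pvSplitD sep s).2 := by
  induction s with
  | nil =>
      intro fuel cur acc h
      obtain ⟨f, rfl⟩ : ∃ f, fuel = f + 1 := ⟨fuel - 1, by have := h; simp at this; omega⟩
      simp [PySem.Chars.splitOn.go, pvSplitD]
  | cons c s ih =>
      intro fuel cur acc h
      obtain ⟨f, rfl⟩ : ∃ f, fuel = f + 1 := ⟨fuel - 1, by have := h; simp at this; omega⟩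
      by_cases hc : c = sep
      · subst hc
        simp [PySem.Chars.splitOn.go, List.isPrefixOf, pvSplitD,
          ih f [] (cur.reverse :: acc) (by simpa using Nat.lt_of_succ_lt_succ h)]
      · have hpre : List.isPrefixOf [sep] (c :: s) = false := by
          simp [List.isPrefixOf]; intro h'; exact hc h'.symm
        simp [PySem.Chars.splitOn.go, hpre, pvSplitD, hc,
          ih f (c :: cur) acc (by simpa using Nat.lt_of_succ_lt_succ h)]

theorem pv_splitOn_eq (sep : Char) (s : List Char) :
    PySem.Chars.splitOn s [sep] = (pvSplitD sep s).1 :: (pvSplitD sep s).2 := by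
  simpa [PySem.Chars.splitOn] using pv_splitOn_go sep s (s.length + 1) [] [] (by omega)

-- head of split('@') is the prefix before the first '@'
theorem pv_splitD_fst (sep : Char) (s : List Char) :
    (pvSplitD sep s).1 = s.takeWhile (fun c => !(c == sep)) := by
  induction s with
  | nil => rfl
  | cons c t ih =>
      by_cases hc : c = sep
      · simp [pvSplitD, hc, List.takeWhile]
      · have hb : (!(c == sep)) = true := by simp [hc]
        simp [pvSplitD, hc, List.takeWhile, hb, ih]

-- character facts (ASCII case maps)
theorem pv_toNat_ofNat (n : Nat) (h : n < 128) : (Char.ofNat n).toNat = n := by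
  unfold Char.ofNat
  rw [dif_pos (by constructor; omega)]
  simp [Char.ofNatAux, Char.toNat, UInt32.toNat_ofNatLT]

theorem pv_isspace_false (c : Char) (h1 : 32 < c.toNat) (h2 : c.toNat ≤ 126) :
    PySem.Chars.isspace c = false := by
  simp [PySem.Chars.isspace]; omega

theorem pv_islower_iff (c : Char) :
    PySem.Chars.islower c = true ↔ 97 ≤ c.toNat ∧ c.toNat ≤ 122 := by
  simp [PySem.Chars.islower, Char.le_def]; exact Iff.rfl

theorem pv_isupper_iff (c : Char) :
    PySem.Chars.isupper c = true ↔ 65 ≤ c.toNat ∧ c.toNat ≤ 90 := by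
  simp [PySem.Chars.isupper, Char.le_def]; exact Iff.rfl

theorem pv_toNat_lower (c : Char) (h : PySem.Chars.isupper c = true) :
    (PySem.Chars.lowerChar c).toNat = c.toNat + 32 := by
  have hb := (pv_isupper_iff c).mp h
  simp [PySem.Chars.lowerChar, h]
  exact pv_toNat_ofNat _ (by omega)

theorem pv_toNat_upper (c : Char) (h : PySem.Chars.islower c = true) :
    (PySem.Chars.upperChar c).toNat = c.toNat - 32 := by
  have hb := (pv_islower_iff c).mp h
  simp [PySem.Chars.upperChar, h]
  exact pv_toNat_ofNat _ (by omega)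

theorem pv_lower_id (c : Char) (h : PySem.Chars.isupper c = false) :
    PySem.Chars.lowerChar c = c := by
  simp [PySem.Chars.lowerChar, h]

theorem pv_upper_id (c : Char) (h : PySem.Chars.islower c = false) :
    PySem.Chars.upperChar c = c := by
  simp [PySem.Chars.upperChar, h]

theorem pv_isspace_lower (c : Char) :
    PySem.Chars.isspace (PySem.Chars.lowerChar c) = PySem.Chars.isspace c := by
  by_cases h : PySem.Chars.isupper c
  · have hb := (pv_isupper_iff c).mp h
    have h1 := pv_toNat_lower c h
    rw [pv_isspace_false _ (by omega) (by omega), pv_isspace_false _ (by omega) (by omega)]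
  · rw [pv_lower_id c (by simpa using h)]

theorem pv_isspace_upper (c : Char) :
    PySem.Chars.isspace (PySem.Chars.upperChar c) = PySem.Chars.isspace c := by
  by_cases h : PySem.Chars.islower c
  · have hb := (pv_islower_iff c).mp h
    have h1 := pv_toNat_upper c h
    rw [pv_isspace_false _ (by omega) (by omega), pv_isspace_false _ (by omega) (by omega)]
  · rw [pv_upper_id c (by simpa using h)]

theorem pv_lower_lower (c : Char) :
    PySem.Chars.lowerChar (PySem.Chars.lowerChar c) = PySem.Chars.lowerChar c := by
  by_cases h : PySem.Chars.isupper c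
  · have hb := (pv_isupper_iff c).mp h
    have h1 := pv_toNat_lower c h
    exact pv_lower_id _ (by rw [← Bool.not_eq_true, pv_isupper_iff]; omega)
  · rw [pv_lower_id c (by simpa using h), pv_lower_id c (by simpa using h)]

theorem pv_upper_upper (c : Char) :
    PySem.Chars.upperChar (PySem.Chars.upperChar c) = PySem.Chars.upperChar c := by
  by_cases h : PySem.Chars.islower c
  · have hb := (pv_islower_iff c).mp h
    have h1 := pv_toNat_upper c h
    exact pv_upper_id _ (by rw [← Bool.not_eq_true, pv_islower_iff]; omega)
  · rw [pv_upper_id c (by simpa using h), pv_upper_id c (by simpa using h)]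

theorem pv_upper_lower (c : Char) :
    PySem.Chars.upperChar (PySem.Chars.lowerChar c) = PySem.Chars.upperChar c := by
  by_cases h : PySem.Chars.isupper c
  · have hb := (pv_isupper_iff c).mp h
    have h1 := pv_toNat_lower c h
    have h2 : PySem.Chars.islower (PySem.Chars.lowerChar c) = true := by
      rw [pv_islower_iff]; omega
    have h3 : PySem.Chars.islower c = false := by
      rw [← Bool.not_eq_true, pv_islower_iff]; omega
    have h4 : PySem.Chars.upperChar (PySem.Chars.lowerChar c) = c := by
      apply Char.ext
      apply UInt32.toNat_inj.mp
      show (PySem.Chars.upperChar (PySem.Chars.lowerChar c)).toNat = c.toNat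
      rw [pv_toNat_upper _ h2, h1]
      omega
    rw [h4, pv_upper_id c h3]
  · rw [pv_lower_id c (by simpa using h)]

theorem pv_lower_comp_lower :
    (PySem.Chars.lowerChar ∘ PySem.Chars.lowerChar) = PySem.Chars.lowerChar :=
  funext pv_lower_lower

theorem pv_cap_map_lower (w : List Char) :
    pyCapitalize (w.map PySem.Chars.lowerChar) = pyCapitalize w := by
  cases w with
  | nil => rfl
  | cons c t =>
      simp [pyCapitalize, pv_upper_lower, List.map_map, pv_lower_comp_lower]

theorem pv_body_map_lower (s : List Char) : ∀ cur,
    pvBody (s.map PySem.Chars.lowerChar) (cur.map PySem.Chars.lowerChar)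
      = (pvBody s cur).map (List.map PySem.Chars.lowerChar) := by
  induction s with
  | nil =>
      intro cur
      by_cases h : cur.isEmpty
      · simp [List.isEmpty_iff] at h; simp [h, pvBody]
      · simp [List.isEmpty_iff] at h
        simp [pvBody, h, List.isEmpty_iff, List.map_reverse]
  | cons c s ih =>
      intro cur
      by_cases hs : PySem.Chars.isspace c
      · have h0 := ih []
        simp at h0
        by_cases h : cur.isEmpty
        · simp [List.isEmpty_iff] at h
          simp [h, pvBody, pv_isspace_lower, hs, h0]
        · simp [List.isEmpty_iff] at h
          simp [pvBody, pv_isspace_lower, hs, h, List.isEmpty_iff, h0, List.map_reverse]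
      · have h1 := ih (c :: cur)
        simp at h1
        simp [pvBody, pv_isspace_lower, hs, h1]

theorem pv_body_sep (b : List Char) (a : List Char) : ∀ cur,
    pvBody (a ++ ' ' :: b) cur = pvBody a cur ++ pvBody b [] := by
  induction a with
  | nil =>
      intro cur
      have : PySem.Chars.isspace ' ' = true := by decide
      by_cases h : cur.isEmpty <;> simp [pvBody, h, this]
  | cons c a ih =>
      intro cur
      by_cases hs : PySem.Chars.isspace c
      · by_cases h : cur.isEmpty <;> simp [pvBody, hs, h, ih]
      · simp [pvBody, hs, ih]

theorem pv_words_join (ps : List (List Char)) :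
    pvBody (PySem.Chars.join [' '] ps) []
      = (ps.map (fun p => pvBody p [])).flatten := by
  induction ps with
  | nil => simp [PySem.Chars.join, List.intercalate, pvBody]
  | cons p ps ih =>
      cases ps with
      | nil => simp [PySem.Chars.join, List.intercalate]
      | cons q qs =>
          have hj : PySem.Chars.join [' '] (p :: q :: qs)
              = p ++ ' ' :: PySem.Chars.join [' '] (q :: qs) := by
            simp [PySem.Chars.join, List.intercalate]
          rw [hj, pv_body_sep]
          simp only [List.map_cons, List.flatten_cons]
          rw [ih]
          simp

theorem pv_body_ne (s : List Char) : ∀ cur, cur ≠ [] →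
    pvBody s cur = (cur.reverse ++ s.takeWhile (fun d => !PySem.Chars.isspace d))
      :: pvBody (s.dropWhile (fun d => !PySem.Chars.isspace d)) [] := by
  induction s with
  | nil => intro cur h; simp [pvBody, List.isEmpty_iff, h]
  | cons c s ih =>
      intro cur h
      by_cases hs : PySem.Chars.isspace c
      · simp [pvBody, hs, List.isEmpty_iff, h]
      · simp [pvBody, hs,
          ih (c :: cur) (by simp)]

-- E3: per-word capitalization is insensitive to a prior pyCapitalize of the whole string
theorem pv_E3 (p : List Char) :
    (pvBody (pyCapitalize p) []).map pyCapitalize = (pvBody p []).map pyCapitalize := by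
  cases p with
  | nil => rfl
  | cons c t =>
      by_cases hs : PySem.Chars.isspace c
      · have hcl : PySem.Chars.islower c = false := by
          rw [← Bool.not_eq_true, pv_islower_iff]
          intro hb
          rw [pv_isspace_false c (by omega) (by omega)] at hs
          exact Bool.false_ne_true hs
        have hcu : PySem.Chars.upperChar c = c := by simp [PySem.Chars.upperChar, hcl]
        have hml := pv_body_map_lower t []
        simp at hml
        have h1 : pvBody (pyCapitalize (c :: t)) []
            = (pvBody t []).map (List.map PySem.Chars.lowerChar) := by
          simp [pyCapitalize, hcu, pvBody, hs, hml]
        have h2 : pvBody (c :: t) [] = pvBody t [] := by simp [pvBody, hs]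
        rw [h1, h2, List.map_map]
        exact List.map_congr_left fun w _ => pv_cap_map_lower w
      · have hsu : PySem.Chars.isspace (PySem.Chars.upperChar c) = false := by
          rw [pv_isspace_upper]; exact Bool.not_eq_true _ ▸ (by simpa using hs)
        have hP : ((fun d => !PySem.Chars.isspace d) ∘ PySem.Chars.lowerChar)
            = fun d => !PySem.Chars.isspace d := by
          funext d; simp [pv_isspace_lower]
        have htake : (t.map PySem.Chars.lowerChar).takeWhile (fun d => !PySem.Chars.isspace d)
            = (t.takeWhile (fun d => !PySem.Chars.isspace d)).map PySem.Chars.lowerChar := by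
          rw [List.takeWhile_map, hP]
        have hdrop : (t.map PySem.Chars.lowerChar).dropWhile (fun d => !PySem.Chars.isspace d)
            = (t.dropWhile (fun d => !PySem.Chars.isspace d)).map PySem.Chars.lowerChar := by
          rw [List.dropWhile_map, hP]
        have hml := pv_body_map_lower (t.dropWhile (fun d => !PySem.Chars.isspace d)) []
        simp at hml
        have h1 : pvBody (pyCapitalize (c :: t)) []
            = (PySem.Chars.upperChar c
                :: (t.takeWhile (fun d => !PySem.Chars.isspace d)).map PySem.Chars.lowerChar)
              :: (pvBody (t.dropWhile (fun d => !PySem.Chars.isspace d)) []).map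
                  (List.map PySem.Chars.lowerChar) := by
          show pvBody (PySem.Chars.upperChar c :: t.map PySem.Chars.lowerChar) [] = _
          rw [show pvBody (PySem.Chars.upperChar c :: t.map PySem.Chars.lowerChar) []
              = pvBody (t.map PySem.Chars.lowerChar) [PySem.Chars.upperChar c] by
            simp [pvBody, hsu]]
          rw [pv_body_ne _ _ (by simp), htake, hdrop, hml]
          simp
        have h2 : pvBody (c :: t) []
            = (c :: t.takeWhile (fun d => !PySem.Chars.isspace d))
              :: pvBody (t.dropWhile (fun d => !PySem.Chars.isspace d)) [] := by
          rw [show pvBody (c :: t) [] = pvBody t [c] by simp [pvBody, hs]]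
          rw [pv_body_ne _ _ (by simp)]
          simp
        rw [h1, h2]
        simp only [List.map_cons, List.map_map]
        congr 1
        · simp [pyCapitalize, pv_upper_upper, List.map_map, pv_lower_comp_lower]
        · simp only [Function.comp_def]
          exact List.map_congr_left fun w _ => pv_cap_map_lower w

-- E2: words after dot→space replacement, generalized over the current word
theorem pv_E2g (cs : List Char) : ∀ cur,
    pvBody (cs.map pvDot) cur
      = pvBody (pvSplitD '.' cs).1 cur ++ ((pvSplitD '.' cs).2.map (fun p => pvBody p [])).flatten := by
  induction cs with
  | nil => intro cur; simp [pvSplitD]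
  | cons c t ih =>
      intro cur
      by_cases hc : c = '.'
      · subst hc
        have hsp : PySem.Chars.isspace ' ' = true := by decide
        by_cases h : cur.isEmpty <;>
          simp [pvDot, pvSplitD, pvBody, hsp, h, ih []]
      · by_cases hs : PySem.Chars.isspace c
        · by_cases h : cur.isEmpty <;>
            simp [pvDot, hc, pvSplitD, pvBody, hs, h, ih []]
        · simp [pvDot, hc, pvSplitD, pvBody, hs, ih (c :: cur)]

theorem pv_dotfree_map (cs : List Char) (h : '.' ∉ cs) : cs.map pvDot = cs := by
  induction cs with
  | nil => rfl
  | cons c t ih =>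
      simp at h
      simp only [List.map_cons, ih h.2, List.cons.injEq, and_true]
      simp [pvDot]
      intro h'; exact absurd h'.symm h.1

theorem pv_filter_flatten (g : List Char → List (List Char)) (hg : g [] = [])
    (l : List (List Char)) :
    (((l.filter fun w => !w.isEmpty).map g)).flatten = (l.map g).flatten := by
  induction l with
  | nil => rfl
  | cons w l ih =>
      by_cases h : w.isEmpty
      · simp [List.isEmpty_iff] at h
        simp [h, hg, ih]
      · simp [h, ih]

-- A's core computation on the local part, reduced to a canonical word list
theorem pv_main (cs : List Char) :
    PySem.Chars.join [' ']
      ((PySem.Chars.split₀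
        (if PySem.Chars.isIn ['.'] cs then
          PySem.Chars.join [' ']
            (((PySem.Chars.splitOn cs ['.']).filter (fun w => !w.isEmpty)).map pyCapitalize)
        else pyCapitalize cs)).map pyCapitalize)
    = PySem.Chars.join [' '] ((pvBody (cs.map pvDot) []).map pyCapitalize) := by
  by_cases hin : PySem.Chars.isIn ['.'] cs
  · rw [if_pos hin]
    rw [pv_splitOn_eq, pv_split₀_eq, pv_words_join]
    have hrhs : pvBody (cs.map pvDot) []
        = (((pvSplitD '.' cs).1 :: (pvSplitD '.' cs).2).map (fun p => pvBody p [])).flatten := by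
      rw [pv_E2g cs []]
      simp
    rw [hrhs]
    congr 1
    simp only [List.map_flatten, List.map_map, Function.comp_def]
    rw [pv_filter_flatten (fun p => List.map pyCapitalize (pvBody (pyCapitalize p) [])) rfl]
    exact congrArg List.flatten (List.map_congr_left fun p _ => pv_E3 p)
  · rw [if_neg hin]
    have hmem : '.' ∉ cs := by
      intro hm
      apply hin
      rw [PySem.Chars.isIn_iff_infix]
      obtain ⟨s, t, rfl⟩ := List.append_of_mem hm
      exact ⟨s, t, by simp⟩
    rw [pv_dotfree_map cs hmem, pv_split₀_eq]
    rw [pv_E3 cs]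

-- ===== B-side characterization =====

-- accumulator-free form of altGo's loop body: sw = start_word, e = (out was empty)
def pvAB : List Char → Bool → Bool → List Char
  | [], _, _ => []
  | c :: t, sw, e =>
      if c == '@' then []
      else if c == '.' || PySem.Chars.isspace c then pvAB t true e
      else if sw then (if e then [] else [' ']) ++ PySem.Chars.upperChar c :: pvAB t false false
      else PySem.Chars.lowerChar c :: pvAB t false false

theorem pv_altGo_eq (s : List Char) : ∀ out sw,
    altGo s out sw = out ++ pvAB s sw out.isEmpty := by
  induction s with
  | nil => intro out sw; simp [altGo, pvAB]
  | cons c t ih =>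
      intro out sw
      by_cases ha : c == '@'
      · simp [altGo, pvAB, ha]
      · by_cases hsep : (c == '.' || PySem.Chars.isspace c) = true
        · simp [altGo, pvAB, ha, hsep, ih]
        · by_cases hsw : sw
          · simp only [altGo, pvAB, ha, hsep, hsw, if_true, if_false, Bool.false_eq_true]
            rw [ih]
            rw [show ((out ++ (if out.isEmpty then [] else [' '])) ++ [PySem.Chars.upperChar c]).isEmpty = false by simp]
            by_cases he : out.isEmpty
            · simp [he]
            · simp [he]
          · simp only [altGo, pvAB, ha, hsep, hsw, if_false, Bool.false_eq_true]
            rw [ih]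
            rw [show (out ++ [PySem.Chars.lowerChar c]).isEmpty = false by simp]
            simp

-- pvAB ignores everything from the first '@' on
theorem pv_pvAB_take (s : List Char) : ∀ sw e,
    pvAB s sw e = pvAB (s.takeWhile (fun c => !(c == '@'))) sw e := by
  induction s with
  | nil => intro sw e; rfl
  | cons c t ih =>
      intro sw e
      by_cases ha : c == '@'
      · simp [pvAB, ha, List.takeWhile]
      · by_cases hsep : (c == '.' || PySem.Chars.isspace c) = true
        · simp [pvAB, ha, hsep, List.takeWhile, ih]
        · by_cases hsw : sw <;> simp [pvAB, ha, hsep, hsw, List.takeWhile, ih]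

-- join-with-spaces, with a leading space when the output is already nonempty
def pvG (ws : List (List Char)) (e : Bool) : List Char :=
  if e then PySem.Chars.join [' '] ws else (ws.map (fun w => ' ' :: w)).flatten

theorem pv_join_cons (w : List Char) (ws : List (List Char)) :
    PySem.Chars.join [' '] (w :: ws) = w ++ (ws.map (fun v => ' ' :: v)).flatten := by
  induction ws generalizing w with
  | nil => simp [PySem.Chars.join, List.intercalate]
  | cons v vs ih =>
      have hj : PySem.Chars.join [' '] (w :: v :: vs)
          = w ++ ' ' :: PySem.Chars.join [' '] (v :: vs) := by
        simp [PySem.Chars.join, List.intercalate]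
      rw [hj, ih v]
      simp

def pvNonsep (c : Char) : Bool := !(c == '.' || PySem.Chars.isspace c)

theorem pv_isspace_dot (c : Char) :
    PySem.Chars.isspace (pvDot c) = (c == '.' || PySem.Chars.isspace c) := by
  by_cases hc : c = '.'
  · subst hc; decide
  · simp [pvDot, hc]

theorem pv_take_dot (t : List Char) :
    (t.map pvDot).takeWhile (fun d => !PySem.Chars.isspace d) = t.takeWhile pvNonsep := by
  rw [List.takeWhile_map]
  have hP : ((fun d => !PySem.Chars.isspace d) ∘ pvDot) = pvNonsep := by
    funext d; simp [pvNonsep, pv_isspace_dot]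
  rw [hP]
  induction t with
  | nil => rfl
  | cons c t ih =>
      by_cases h : pvNonsep c = true
      · have hc : c ≠ '.' := by simp [pvNonsep] at h; intro h'; simp [h'] at h
        simp [List.takeWhile, h, ih, pvDot, hc]
      · simp at h; simp [List.takeWhile, h]

theorem pv_drop_dot (t : List Char) :
    (t.map pvDot).dropWhile (fun d => !PySem.Chars.isspace d) = (t.dropWhile pvNonsep).map pvDot := by
  rw [List.dropWhile_map]
  have hP : ((fun d => !PySem.Chars.isspace d) ∘ pvDot) = pvNonsep := by
    funext d; simp [pvNonsep, pv_isspace_dot]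
  rw [hP]

-- the two state-machine invariants, proved together by induction on s ('@'-free input)
theorem pv_AB_main (s : List Char) (hs : '@' ∉ s) :
    (∀ e, pvAB s true e = pvG ((pvBody (s.map pvDot) []).map pyCapitalize) e)
    ∧ pvAB s false false
        = (s.takeWhile pvNonsep).map PySem.Chars.lowerChar
          ++ pvG ((pvBody ((s.dropWhile pvNonsep).map pvDot) []).map pyCapitalize) false := by
  induction s with
  | nil =>
      have h0 : pvBody ([] : List Char) [] = [] := by simp [pvBody]
      exact ⟨fun e => by
        cases e <;> simp [pvAB, h0, pvG, PySem.Chars.join, List.intercalate], by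
        simp [pvAB, pvG, h0]⟩
  | cons c t ih =>
      simp only [List.mem_cons, not_or] at hs
      obtain ⟨hne, hmem⟩ := hs
      obtain ⟨ih1, ih2⟩ := ih hmem
      have ha : (c == '@') = false := beq_eq_false_iff_ne.mpr (fun h => hne h.symm)
      constructor
      · intro e
        by_cases hsep : (c == '.' || PySem.Chars.isspace c) = true
        · have hsd : PySem.Chars.isspace (pvDot c) = true := by rw [pv_isspace_dot]; exact hsep
          simp only [pvAB, ha, Bool.false_eq_true, if_false, hsep, if_true]
          rw [ih1 e]
          simp [pvBody, hsd]
        · have hsd : PySem.Chars.isspace (pvDot c) = false := by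
            rw [pv_isspace_dot]; simpa using hsep
          have hcd : pvDot c = c := by
            simp at hsep; simp [pvDot, hsep.1]
          simp only [pvAB, ha, Bool.false_eq_true, if_false, hsep, if_true]
          rw [ih2]
          have hb : pvBody ((c :: t).map pvDot) []
              = (c :: t.takeWhile pvNonsep)
                :: pvBody ((t.dropWhile pvNonsep).map pvDot) [] := by
            rw [show ((c :: t).map pvDot) = pvDot c :: t.map pvDot by simp]
            rw [show pvBody (pvDot c :: t.map pvDot) [] = pvBody (t.map pvDot) [pvDot c] by
              simp [pvBody, hsd]]
            rw [pv_body_ne _ _ (by simp), pv_take_dot, pv_drop_dot, hcd]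
            simp
          rw [hb]
          simp only [List.map_cons, pyCapitalize]
          cases e <;> simp [pvG, pv_join_cons]
      · by_cases hsep : (c == '.' || PySem.Chars.isspace c) = true
        · have hns : pvNonsep c = false := by simp [pvNonsep, hsep]
          have hsd : PySem.Chars.isspace (pvDot c) = true := by rw [pv_isspace_dot]; exact hsep
          simp only [pvAB, ha, Bool.false_eq_true, if_false, hsep, if_true]
          rw [ih1 false]
          simp [List.takeWhile, List.dropWhile, hns, pvBody, hsd]
        · have hns : pvNonsep c = true := by simp [pvNonsep]; simpa using hsep
          simp only [pvAB, ha, Bool.false_eq_true, if_false, hsep]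
          rw [ih2]
          simp [List.takeWhile, List.dropWhile, hns]

-- ===== VERDICT (by name: the statement is the Claim_ definition above) =====
theorem extract_name_from_email_spec : Claim_equal_extract_name_from_email := by
  intro email _
  unfold Spec_extract_name_from_email extract_name_from_email extract_name_from_email_alt
  by_cases hg : (email == "" || !(PySem.Str.isIn "@" email)) = true
  · simp only [hg, if_true]
  · simp only [hg, Bool.false_eq_true, if_false]
    apply congrArg String.ofList
    rw [pv_main]
    have hhd : (PySem.Chars.splitOn email.toList ['@']).headD []
        = email.toList.takeWhile (fun c => !(c == '@')) := by
      rw [pv_splitOn_eq]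
      simp [pv_splitD_fst]
    have hmem : '@' ∉ email.toList.takeWhile (fun c => !(c == '@')) := by
      intro hm
      have := List.mem_takeWhile_imp hm
      simp at this
    rw [hhd, pv_altGo_eq, pv_pvAB_take, List.nil_append,
      show (List.nil (α := Char)).isEmpty = true from rfl,
      (pv_AB_main _ hmem).1 true]
    rfl
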